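-- pv_equiv track=rewrite | github.com/ozbej/Faculty-of-Computer-and-Information-Science | Undergraduate/Python programming/naloga5 - županske volitve.py | voljeni
-- ===== SOURCE A (Python) =====
-- def glasov(obkrozeno):
--     count = 0
--     for i in obkrozeno:
--         if i:
--             count += 1
--     return count
--
-- def voljeni(obkrozeno, imena):
--     glasovnica = {}
--     for obkrozen, ime in zip(obkrozeno, imena):
--         if glasov(obkrozeno) != 1:
--             return None
--         glasovnica[ime] = obkrozen
--         if obkrozen:
--             return ime
-- ===== SOURCE B (Python) =====
-- def voljeni(obkrozeno, imena):
--     if sum(1 for x in obkrozeno if x) != 1: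
--         return None
--     idx = next(i for i, x in enumerate(obkrozeno) if x)
--     return imena[idx] if idx < len(imena) else None
-- ===== Notes on version B (the rewrite author's own statement) =====
-- stated objective: simpler
-- what changed: Replaces the parallel zip walk with a per-iteration full recount and a dead dict by a single count followed by a direct index lookup of the unique circled position.
import Mathlib
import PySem

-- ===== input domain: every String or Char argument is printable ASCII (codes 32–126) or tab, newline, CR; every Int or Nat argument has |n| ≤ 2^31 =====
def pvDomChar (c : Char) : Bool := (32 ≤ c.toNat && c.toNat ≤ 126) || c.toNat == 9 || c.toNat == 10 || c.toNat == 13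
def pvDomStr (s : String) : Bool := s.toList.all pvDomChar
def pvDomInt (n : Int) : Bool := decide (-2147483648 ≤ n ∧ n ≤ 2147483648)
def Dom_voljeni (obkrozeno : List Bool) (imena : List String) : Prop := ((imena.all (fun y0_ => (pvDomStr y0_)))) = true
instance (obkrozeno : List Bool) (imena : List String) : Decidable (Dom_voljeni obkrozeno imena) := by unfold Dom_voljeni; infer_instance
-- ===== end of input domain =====

-- B replaces A's parallel zip walk (with an O(n) recount per step and a dead dict) by one count then a direct index lookup; equal return value on all inputs.
-- ===== PORT A =====
def glasovLean (obkrozeno : List Bool) : Int :=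
  obkrozeno.foldl (fun count i => if i then count + 1 else count) 0

def voljeniLoop (obkrozeno : List Bool) (pairs : List (Bool × String))
    (glasovnica : PySem.Dict String Bool) : Option String :=
  match pairs with
  | [] => none
  | (obkrozen, ime) :: rest =>
    if glasovLean obkrozeno ≠ 1 then none
    else
      let glasovnica := glasovnica.insert ime obkrozen
      if obkrozen then some ime else voljeniLoop obkrozeno rest glasovnica

def voljeni (obkrozeno : List Bool) (imena : List String) : Option String :=
  voljeniLoop obkrozeno (obkrozeno.zip imena) (PySem.Dict.empty)

-- ===== PORT B =====
def voljeni_alt (obkrozeno : List Bool) (imena : List String) : Option String :=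
  if (obkrozeno.countP (fun x => x)) ≠ 1 then none
  else
    match obkrozeno.findIdx? (fun x => x) with
    | none => none  -- unreachable: count = 1 guarantees a circled entry
    | some idx => if idx < imena.length then imena[idx]? else none

-- ===== PRECONDITION & SPEC =====
def Spec_voljeni (obkrozeno : List Bool) (imena : List String) (out : Option String) : Prop := out = voljeni_alt obkrozeno imena
instance (obkrozeno : List Bool) (imena : List String) (out : Option String) : Decidable (Spec_voljeni obkrozeno imena out) := by unfold Spec_voljeni; infer_instance

-- ===== CLAIM (what is proved, stated in full; the proofs are below) =====
def Claim_equal_voljeni : Prop := ∀ (obkrozeno : List Bool) (imena : List String), Dom_voljeni obkrozeno imena → Spec_voljeni obkrozeno imena (voljeni obkrozeno imena)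

-- ===== LEMMAS AND PROOFS =====



lemma glasovLean_eq (bs : List Bool) (c : Int) :
    bs.foldl (fun count i => if i then count + 1 else count) c = c + bs.countP (fun x => x) := by
  induction bs generalizing c with
  | nil => simp
  | cons b bs ih => cases b <;> simp [ih] <;> ring

lemma loop_none (obkrozeno : List Bool) (h : glasovLean obkrozeno ≠ 1)
    (pairs : List (Bool × String)) (g : PySem.Dict String Bool) :
    voljeniLoop obkrozeno pairs g = none := by
  cases pairs with
  | nil => rfl
  | cons p rest => cases p; simp [voljeniLoop, h]

lemma loop_eq (obkrozeno : List Bool) (h : glasovLean obkrozeno = 1) :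
    ∀ (bs : List Bool) (ns : List String) (g : PySem.Dict String Bool),
      voljeniLoop obkrozeno (bs.zip ns) g
        = (bs.findIdx? (fun x => x)).bind (fun i => ns[i]?) := by
  intro bs
  induction bs with
  | nil => intro ns g; simp [voljeniLoop]
  | cons b bs ih =>
    intro ns g
    cases ns with
    | nil =>
      cases (List.findIdx? (fun x => x) (b :: bs)) <;> simp [voljeniLoop]
    | cons n ns =>
      cases b with
      | false => simp [voljeniLoop, h, List.findIdx?_cons, ih, Option.bind_map]
      | true => simp [voljeniLoop, h, List.findIdx?_cons]

-- ===== VERDICT =====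
theorem voljeni_spec : Claim_equal_voljeni := by
  intro obkrozeno imena _
  unfold Spec_voljeni voljeni voljeni_alt
  by_cases h : glasovLean obkrozeno = 1
  · have hc : obkrozeno.countP (fun x => x) = 1 := by
      have := glasovLean_eq obkrozeno 0
      unfold glasovLean at h; omega
    rw [loop_eq obkrozeno h]
    simp only [hc]
    cases hf : obkrozeno.findIdx? (fun x => x) with
    | none => simp
    | some idx =>
      simp only [Option.bind_some, if_neg (by simp : ¬ (1 : Nat) ≠ 1)]
      by_cases hl : idx < imena.length
      · simp [hl]
      · rw [List.getElem?_eq_none (by omega : imena.length ≤ idx)]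
        simp [hl]
  · have hc : obkrozeno.countP (fun x => x) ≠ 1 := by
      have := glasovLean_eq obkrozeno 0
      unfold glasovLean at h; omega
    rw [loop_none obkrozeno h]
    simp [hc]
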